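-- pv_equiv track=rewrite | github.com/Eduardo-Acuna/Proyecto_algoritmo2_2023 | Trabajo_Practico/Funcion_Circunf2.py | aux_tres_constantes_a_cadena
-- ===== SOURCE A (Python) =====
-- def aux_tres_constantes_a_cadena(a , b , c): # Devuelve cadena corregida, pide 3 parámetros
--     # Se encarga de agregar a la lista_permitidos solo las constantes distintas a 0
--     lista_permitidos = []
--     if a != 0:
--
--         if a == 1:
--             lista_permitidos.append('x')
--         elif a == -1:
--             lista_permitidos.append('-x')
--         else:
--             lista_permitidos.append(str(a) + 'x')
--
--     if b != 0:
--
--         if b == 1: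
--             lista_permitidos.append('y')
--         elif b == -1:
--             lista_permitidos.append('-y')
--         else:
--             lista_permitidos.append(str(b) + 'y')
--
--     if c != 0:
--         lista_permitidos.append(str(c))
--
--     # Se encarga de estudiar el signo de cada variable
--     lista_signo = []
--     if a > 0:
--         lista_signo.append('+')
--     elif a < 0:
--         lista_signo.append('-')
--
--     if b > 0:
--         lista_signo.append('+')
--     elif b < 0:
--         lista_signo.append('-')
--
--     if c > 0:
--         lista_signo.append('+')
--     elif c < 0:
--         lista_signo.append('-')
--
--     # Se encarga de agregar a una cadena los términos con sus respectivos signos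
--     txt = ''
--     for i in range( len(lista_permitidos) ):
--         elemento = str(lista_permitidos[i])
--         signo = str(lista_signo[i])
--
--         if signo == '+':
--             txt += signo + elemento
--         else:
--             txt += elemento
--
--     cadena_formada = txt.lstrip('+')
--
--     return cadena_formada
-- ===== SOURCE B (Python) =====
-- def aux_tres_constantes_a_cadena(a, b, c):
--     parts = []
--     for coef, var in ((a, 'x'), (b, 'y'), (c, '')):
--         if coef != 0:
--             sign = '+' if coef > 0 else '-'
--             if var and abs(coef) == 1:
--                 mag = var
--             else:
--                 mag = str(abs(coef)) + var
--             parts.append(sign + mag)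
--     return ''.join(parts).lstrip('+')
-- ===== Notes on version B (the rewrite author's own statement) =====
-- stated objective: simpler
-- what changed: B replaces A's two parallel lists (unsigned terms and signs) plus an index loop joining them by a single data-driven pass over [(a,'x'),(b,'y'),(c,'')] that builds each signed term directly from the coefficient's sign and absolute value.
import Mathlib
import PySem

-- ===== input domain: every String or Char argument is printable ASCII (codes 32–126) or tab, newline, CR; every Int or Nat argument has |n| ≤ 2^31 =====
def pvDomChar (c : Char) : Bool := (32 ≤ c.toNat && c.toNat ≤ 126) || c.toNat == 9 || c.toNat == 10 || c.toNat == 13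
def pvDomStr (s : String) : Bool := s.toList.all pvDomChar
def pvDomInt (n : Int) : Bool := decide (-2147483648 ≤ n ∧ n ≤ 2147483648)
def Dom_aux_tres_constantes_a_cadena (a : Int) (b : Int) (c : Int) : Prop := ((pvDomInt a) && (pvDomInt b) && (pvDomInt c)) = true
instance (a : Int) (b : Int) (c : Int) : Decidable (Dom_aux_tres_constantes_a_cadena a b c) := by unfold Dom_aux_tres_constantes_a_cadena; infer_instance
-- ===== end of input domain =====

-- B replaces A's two parallel lists (terms, signs) and the index loop by one pass that
-- builds each signed term directly from (coefficient, variable-name); objective: simpler.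

-- hand port of str.lstrip('+') (exact: drops exactly the leading '+' characters), shared by both ports
def pvLstripPlus (cs : List Char) : List Char := List.dropWhile (fun ch => ch == '+') cs

-- ===== PORT A =====
def aux_tres_constantes_a_cadena (a : Int) (b : Int) (c : Int) : String :=
  -- the three sequential appends to lista_permitidos, in order
  let lista_permitidos : List (List Char) :=
    (if a ≠ 0 then
       (if a = 1 then [['x']]
        else if a = -1 then [['-', 'x']]
        else [PySem.Int.toChars a ++ ['x']])
     else []) ++
    (if b ≠ 0 then
       (if b = 1 then [['y']]
        else if b = -1 then [['-', 'y']]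
        else [PySem.Int.toChars b ++ ['y']])
     else []) ++
    (if c ≠ 0 then [PySem.Int.toChars c] else [])
  -- the three sequential appends to lista_signo, in order
  let lista_signo : List (List Char) :=
    (if a > 0 then [['+']] else if a < 0 then [['-']] else []) ++
    (if b > 0 then [['+']] else if b < 0 then [['-']] else []) ++
    (if c > 0 then [['+']] else if c < 0 then [['-']] else [])
  -- for i in range(len(lista_permitidos)); the indexings never go out of range
  let txt : List Char :=
    (List.range lista_permitidos.length).foldl
      (fun txt i =>
        let elemento := lista_permitidos.getD i []
        let signo := lista_signo.getD i []
        if signo = ['+'] then txt ++ signo ++ elemento else txt ++ elemento)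
      []
  String.ofList (pvLstripPlus txt)

-- ===== PORT B =====
def aux_tres_constantes_a_cadena_alt (a : Int) (b : Int) (c : Int) : String :=
  let parts : List (List Char) :=
    [(a, ['x']), (b, ['y']), (c, ([] : List Char))].foldl
      (fun acc p =>
        if p.1 ≠ 0 then
          let sign : List Char := if p.1 > 0 then ['+'] else ['-']
          let mag : List Char :=
            if p.2 ≠ [] ∧ p.1.natAbs = 1 then p.2
            else PySem.Int.toChars |p.1| ++ p.2
          acc ++ [sign ++ mag]
        else acc)
      []
  String.ofList (pvLstripPlus (PySem.Chars.join [] parts))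

-- ===== PRECONDITION & SPEC =====
def Spec_aux_tres_constantes_a_cadena (a : Int) (b : Int) (c : Int) (out : String) : Prop := out = aux_tres_constantes_a_cadena_alt a b c
instance (a : Int) (b : Int) (c : Int) (out : String) : Decidable (Spec_aux_tres_constantes_a_cadena a b c out) := by unfold Spec_aux_tres_constantes_a_cadena; infer_instance

-- ===== CLAIM (what is proved, stated in full; the proofs are below) =====
def Claim_equal_aux_tres_constantes_a_cadena : Prop := ∀ (a : Int) (b : Int) (c : Int), Dom_aux_tres_constantes_a_cadena a b c → Spec_aux_tres_constantes_a_cadena a b c (aux_tres_constantes_a_cadena a b c)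

-- ===== LEMMAS AND PROOFS =====

lemma digitChar_ne_plus (m : Nat) : Nat.digitChar m ≠ '+' := by
  by_cases h : m ≤ 15
  · interval_cases m <;> decide
  · unfold Nat.digitChar
    rw [if_neg (by omega), if_neg (by omega), if_neg (by omega), if_neg (by omega),
        if_neg (by omega), if_neg (by omega), if_neg (by omega), if_neg (by omega),
        if_neg (by omega), if_neg (by omega), if_neg (by omega), if_neg (by omega),
        if_neg (by omega), if_neg (by omega), if_neg (by omega), if_neg (by omega)]
    decide
lemma toDigitsCore_ne_plus (fuel n : Nat) (ds : List Char) (hds : ∀ ch ∈ ds, ch ≠ '+') :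
    ∀ ch ∈ Nat.toDigitsCore 10 fuel n ds, ch ≠ '+' := by
  induction fuel generalizing n ds with
  | zero => exact hds
  | succ fuel ih =>
    intro ch hch
    rw [Nat.toDigitsCore] at hch
    by_cases h10 : n / 10 = 0 <;> simp only [h10, reduceIte] at hch
    · rw [List.mem_cons] at hch
      rcases hch with h | h
      · exact h ▸ digitChar_ne_plus _
      · exact hds _ h
    · exact ih _ _ (by
        intro d hd
        rw [List.mem_cons] at hd
        rcases hd with h | h
        · exact h ▸ digitChar_ne_plus _
        · exact hds _ h) ch hch
lemma toDigitsCore_ne_nil (fuel n : Nat) (ds : List Char) (h : ds ≠ []) :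
    Nat.toDigitsCore 10 fuel n ds ≠ [] := by
  induction fuel generalizing n ds with
  | zero => exact h
  | succ fuel ih =>
    rw [Nat.toDigitsCore]
    by_cases h10 : n / 10 = 0 <;> simp only [h10, reduceIte]
    · simp
    · exact ih _ _ (by simp)
lemma toDigitsCore_succ_ne_nil (fuel n : Nat) (ds : List Char) :
    Nat.toDigitsCore 10 (fuel + 1) n ds ≠ [] := by
  rw [Nat.toDigitsCore]
  by_cases h10 : n / 10 = 0 <;> simp only [h10, reduceIte]
  · simp
  · exact toDigitsCore_ne_nil _ _ _ (by simp)
lemma dropWhile_plus_toDigits (n : Nat) (t : List Char) :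
    List.dropWhile (fun ch => ch == '+') (Nat.toDigits 10 n ++ t) = Nat.toDigits 10 n ++ t := by
  unfold Nat.toDigits
  rcases h : Nat.toDigitsCore 10 (n + 1) n [] with _ | ⟨d, rest⟩
  · exact absurd h (toDigitsCore_succ_ne_nil n n [])
  · have hd : d ≠ '+' :=
      toDigitsCore_ne_plus (n + 1) n [] (by simp) d (by rw [h]; exact List.mem_cons_self)
    simp [hd]


lemma dropWhile_plus_toDigits' (n : Nat) :
    List.dropWhile (fun ch => ch == '+') (Nat.toDigits 10 n) = Nat.toDigits 10 n := by
  simpa using dropWhile_plus_toDigits n []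

lemma toChars_of_neg (a : Int) (h : a < 0) :
    PySem.Int.toChars a = '-' :: PySem.Int.toChars (-a) := by
  unfold PySem.Int.toChars
  rw [if_pos h, if_neg (by omega)]
  congr 2
  omega

lemma toChars_nonneg_eq (a : Int) (h : 0 ≤ a) :
    PySem.Int.toChars a = Nat.toDigits 10 a.toNat := by
  unfold PySem.Int.toChars
  rw [if_neg (by omega)]

lemma toChars_neg_neg (a : Int) (h : a < 0) :
    PySem.Int.toChars (-a) = Nat.toDigits 10 (-a).toNat := by
  unfold PySem.Int.toChars
  rw [if_neg (by omega)]

-- ===== VERDICT (by name: the statement is the Claim_ definition above) =====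
set_option maxHeartbeats 2000000 in
theorem aux_tres_constantes_a_cadena_spec : Claim_equal_aux_tres_constantes_a_cadena := by
  intro a b c _
  unfold Spec_aux_tres_constantes_a_cadena
  unfold aux_tres_constantes_a_cadena aux_tres_constantes_a_cadena_alt
  rcases (show a = 0 ∨ a = 1 ∨ a = -1 ∨ 1 < a ∨ a < -1 by omega) with ha | ha | ha | ha | ha <;>
  rcases (show b = 0 ∨ b = 1 ∨ b = -1 ∨ 1 < b ∨ b < -1 by omega) with hb | hb | hb | hb | hb <;>
  rcases (show c = 0 ∨ 0 < c ∨ c < 0 by omega) with hc | hc | hc <;>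
    simp only [ha, hb] <;>
    simp [pvLstripPlus, PySem.Chars.join, List.range_succ,
      toChars_of_neg, toChars_nonneg_eq, toChars_neg_neg, dropWhile_plus_toDigits, dropWhile_plus_toDigits', List.dropWhile,
      abs_of_pos, abs_of_neg,
      show ∀ x : Int, 0 < x → 0 ≤ x from fun x h => le_of_lt h,
      show ∀ x : Int, 1 < x → x.natAbs ≠ 1 from fun x h => by omega,
      show ∀ x : Int, x < -1 → x.natAbs ≠ 1 from fun x h => by omega,
      show ∀ x : Int, 1 < x → x ≠ 0 ∧ x ≠ 1 ∧ x ≠ -1 ∧ 0 < x ∧ ¬ x < 0 from fun x h => by omega,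
      show ∀ x : Int, x < -1 → x ≠ 0 ∧ x ≠ 1 ∧ x ≠ -1 ∧ ¬ 0 < x ∧ x < 0 from fun x h => by omega,
      show ∀ x : Int, 0 < x → x ≠ 0 ∧ ¬ x < 0 from fun x h => by omega,
      show ∀ x : Int, x < 0 → x ≠ 0 ∧ ¬ 0 < x from fun x h => by omega,
      List.intercalate, ha, hb, hc]
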